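-- pv_equiv track=rewrite | github.com/Astri2/AVLSI-Project-Boolean-function-minimization | step3.py | selectAdditionalImplicant
-- ===== SOURCE A (Python) =====
-- def selectAdditionalImplicant(chart, uncovered, currentImplicants):
--     selected = []
--
--     # for each non selected implicant
--     for imp, row in chart.items():
--         if imp in currentImplicants:
--             continue
--
--         # count the number of uncovered minterm the implicant could cover if selected
--         count = sum(1 for i in uncovered if row[i] == "1")
--         if count > 0:
--             selected.append((count, imp))
--
--     if not selected:
--         return []
--
--     # selected the implicant covering the most minterms
--     selected.sort(reverse=True)
--     return [selected[0][1]]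
-- ===== SOURCE B (Python) =====
-- def selectAdditionalImplicant(chart, uncovered, currentImplicants):
--     # single tracking scan: keep the best (count, imp) tuple instead of
--     # building a list of candidates and sorting it
--     best = None
--     for imp, row in chart.items():
--         if imp in currentImplicants:
--             continue
--         count = sum(1 for i in uncovered if row[i] == "1")
--         if count > 0 and (best is None or (count, imp) > best):
--             best = (count, imp)
--     return [] if best is None else [best[1]]
-- ===== Notes on version B (the rewrite author's own statement) =====
-- stated objective: simpler
-- what changed: Replaces the build-candidate-list-then-reverse-sort selection with a single tracking scan that keeps one running best (count, imp) tuple; the intermediate list and the sort disappear.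
import Mathlib
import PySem

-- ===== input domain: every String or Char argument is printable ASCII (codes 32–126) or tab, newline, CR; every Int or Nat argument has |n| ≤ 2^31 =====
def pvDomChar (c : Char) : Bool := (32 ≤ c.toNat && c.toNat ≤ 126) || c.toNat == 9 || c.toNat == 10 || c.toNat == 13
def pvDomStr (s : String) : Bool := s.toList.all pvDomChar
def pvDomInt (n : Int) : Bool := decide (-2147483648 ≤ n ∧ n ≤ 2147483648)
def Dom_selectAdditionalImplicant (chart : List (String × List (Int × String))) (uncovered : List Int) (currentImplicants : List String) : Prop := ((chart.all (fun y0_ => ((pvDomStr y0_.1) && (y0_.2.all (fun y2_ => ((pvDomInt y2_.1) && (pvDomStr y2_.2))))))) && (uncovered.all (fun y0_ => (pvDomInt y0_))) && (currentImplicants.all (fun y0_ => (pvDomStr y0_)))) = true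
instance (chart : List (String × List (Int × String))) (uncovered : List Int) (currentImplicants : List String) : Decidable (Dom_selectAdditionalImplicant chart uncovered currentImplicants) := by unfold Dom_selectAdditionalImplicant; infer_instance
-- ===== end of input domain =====

-- B replaces A's build-candidate-list-then-reverse-sort selection by a single tracking scan
-- keeping one running best (count, imp) tuple (objective: simpler).


-- ===== PORT A =====
-- count = sum(1 for i in uncovered if row[i] == "1"); row is a dict, row[i] is Dict.get?
-- (none = KeyError, excluded by Pre_; the none branch adds nothing there).
def pvCount (row : List (Int × String)) (uncovered : List Int) : Int :=
  uncovered.foldl (fun c i =>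
    match (PySem.Dict.mk row).get? i with
    | some s => if s = "1" then c + 1 else c
    | none => c) 0

-- the body of A's for-loop (build the candidate list)
def pvStepA (uncovered : List Int) (currentImplicants : List String)
    (sel : List (Int × String)) (p : String × List (Int × String)) : List (Int × String) :=
  if currentImplicants.contains p.1 then sel
  else
    let count := pvCount p.2 uncovered
    if count > 0 then sel ++ [(count, p.1)] else sel

def selectAdditionalImplicant (chart : List (String × List (Int × String))) (uncovered : List Int) (currentImplicants : List String) : List String :=
  let selected := chart.foldl (pvStepA uncovered currentImplicants) []
  if selected = [] then []
  else
    match PySem.List.sorted2 selected (fun q => q.1) (fun q => q.2) true with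
    | [] => []
    | q :: _ => [q.2]

-- ===== PORT B =====
-- the body of B's for-loop (track the best (count, imp) tuple; the Bool match is
-- Python's 'best is None or (count, imp) > best' with the tuple comparison spelt out)
def pvStepB (uncovered : List Int) (currentImplicants : List String)
    (best : Option (Int × String)) (p : String × List (Int × String)) : Option (Int × String) :=
  if currentImplicants.contains p.1 then best
  else
    let count := pvCount p.2 uncovered
    if count > 0 && (match best with
                     | none => true
                     | some b => decide (count > b.1) || (count == b.1 && decide (b.2 < p.1))) then
      some (count, p.1)
    else best

def selectAdditionalImplicant_alt (chart : List (String × List (Int × String))) (uncovered : List Int) (currentImplicants : List String) : List String :=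
  match chart.foldl (pvStepB uncovered currentImplicants) none with
  | none => []
  | some b => [b.2]

-- ===== PRECONDITION & SPEC =====
-- Pre_ excludes exactly the inputs where Python A raises KeyError: some uncovered minterm i is
-- not a key of the row of a considered (non-selected) implicant.
def Pre_selectAdditionalImplicant (chart : List (String × List (Int × String))) (uncovered : List Int) (currentImplicants : List String) : Prop :=
  (chart.all (fun p =>
    currentImplicants.contains p.1 ||
    uncovered.all (fun i => (p.2.map Prod.fst).contains i))) = true
instance (chart : List (String × List (Int × String))) (uncovered : List Int) (currentImplicants : List String) : Decidable (Pre_selectAdditionalImplicant chart uncovered currentImplicants) := by unfold Pre_selectAdditionalImplicant; infer_instance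

def pvWitness_selectAdditionalImplicant : (List (String × List (Int × String))) × List Int × List String :=
  ([("a", [((0 : Int), "1"), ((1 : Int), "0")]), ("b", [((0 : Int), "1"), ((1 : Int), "1")])], [(0 : Int), (1 : Int)], ["c"])

def Spec_selectAdditionalImplicant (chart : List (String × List (Int × String))) (uncovered : List Int) (currentImplicants : List String) (out : List String) : Prop := out = selectAdditionalImplicant_alt chart uncovered currentImplicants
instance (chart : List (String × List (Int × String))) (uncovered : List Int) (currentImplicants : List String) (out : List String) : Decidable (Spec_selectAdditionalImplicant chart uncovered currentImplicants out) := by unfold Spec_selectAdditionalImplicant; infer_instance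

-- ===== CLAIM (what is proved, stated in full; the proofs are below) =====
def Claim_equal_selectAdditionalImplicant : Prop := ∀ (chart : List (String × List (Int × String))) (uncovered : List Int) (currentImplicants : List String), Dom_selectAdditionalImplicant chart uncovered currentImplicants → Pre_selectAdditionalImplicant chart uncovered currentImplicants → Spec_selectAdditionalImplicant chart uncovered currentImplicants (selectAdditionalImplicant chart uncovered currentImplicants)

-- ===== LEMMAS AND PROOFS =====

-- the running-best update that insertion into a reverse-sorted list performs on the head
def pvUpd {α : Type} (before : α → α → Bool) (o : Option α) (x : α) : Option α :=
  match o with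
  | none => some x
  | some h => if before x h then some x else some h

-- "x strictly beats h" test of the reverse 2-key sort (identity keys)
def pvBefore : (Int × String) → (Int × String) → Bool :=
  fun a b => decide (b.1 < a.1) || (!decide (a.1 < b.1) && decide (b.2 < a.2))

theorem head?_insertBy {α : Type} (before : α → α → Bool) (x : α) (acc : List α) :
    (PySem.List.insertBy before x acc).head? = pvUpd before acc.head? x := by
  cases acc with
  | nil => rfl
  | cons h t =>
    simp only [PySem.List.insertBy, pvUpd]
    split <;> simp_all

theorem head?_foldl_insertBy {α : Type} (before : α → α → Bool) :
    ∀ (l acc : List α),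
      (l.foldl (fun a x => PySem.List.insertBy before x a) acc).head? =
        l.foldl (pvUpd before) acc.head? := by
  intro l
  induction l with
  | nil => intro acc; rfl
  | cons x t ih =>
    intro acc
    simp only [List.foldl_cons, ih, head?_insertBy]

theorem foldl_upd_none_iff {α : Type} (before : α → α → Bool) :
    ∀ (l : List α), l.foldl (pvUpd before) none = none ↔ l = [] := by
  intro l
  cases l with
  | nil => simp
  | cons x t =>
    simp only [List.foldl_cons, pvUpd]
    constructor
    · intro h
      exfalso
      have : ∀ (t' : List α) (o : α), t'.foldl (pvUpd before) (some o) ≠ none := by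
        intro t'
        induction t' with
        | nil => intro o; simp
        | cons y s ih =>
          intro o
          simp only [List.foldl_cons, pvUpd]
          split <;> apply ih
      exact this t x h
    · intro h; cases h

theorem stepA_append (uncovered : List Int) (currentImplicants : List String)
    (sel : List (Int × String)) (p : String × List (Int × String)) :
    pvStepA uncovered currentImplicants sel p =
      sel ++ pvStepA uncovered currentImplicants [] p := by
  simp only [pvStepA]
  by_cases h1 : currentImplicants.contains p.1
  · rw [if_pos h1, if_pos h1]
    simp
  · rw [if_neg h1, if_neg h1]
    by_cases h2 : pvCount p.2 uncovered > 0
    · rw [if_pos h2, if_pos h2]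
      simp
    · rw [if_neg h2, if_neg h2]
      simp

theorem selA_acc (uncovered : List Int) (currentImplicants : List String) :
    ∀ (chart : List (String × List (Int × String))) (sel : List (Int × String)),
      chart.foldl (pvStepA uncovered currentImplicants) sel =
        sel ++ chart.foldl (pvStepA uncovered currentImplicants) [] := by
  intro chart
  induction chart with
  | nil => intro sel; simp
  | cons p t ih =>
    intro sel
    simp only [List.foldl_cons]
    rw [ih (pvStepA uncovered currentImplicants sel p),
      ih (pvStepA uncovered currentImplicants [] p),
      stepA_append uncovered currentImplicants sel p, List.append_assoc]

-- Python's tuple test (count, imp) > (b1, b2) is the "before" test of the reverse sort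
theorem before_eq (c q1 : Int) (s q2 : String) :
    (decide (c > q1) || (c == q1 && decide (q2 < s))) = pvBefore (c, s) (q1, q2) := by
  simp only [pvBefore]
  rcases lt_trichotomy q1 c with h | h | h
  · simp [h, gt_iff_lt]
  · simp [h]
  · simp [h, not_lt_of_gt h, gt_iff_lt, Int.ne_of_lt h]

theorem stepB_eq (uncovered : List Int) (currentImplicants : List String)
    (b : Option (Int × String)) (p : String × List (Int × String)) :
    pvStepB uncovered currentImplicants b p =
      (pvStepA uncovered currentImplicants [] p).foldl (pvUpd pvBefore) b := by
  unfold pvStepB pvStepA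
  by_cases h1 : currentImplicants.contains p.1
  · rw [if_pos h1, if_pos h1]
    rfl
  · simp only [h1]
    by_cases h2 : pvCount p.2 uncovered > 0
    · simp only [h2, decide_true, Bool.true_and]
      cases b with
      | none => simp [pvUpd]
      | some q =>
        simp only [before_eq (pvCount p.2 uncovered) q.1 p.1 q.2]
        cases hb : pvBefore (pvCount p.2 uncovered, p.1) q <;> simp [pvUpd, hb]
    · simp [h2]

theorem bfold_eq_updfold (uncovered : List Int) (currentImplicants : List String) :
    ∀ (chart : List (String × List (Int × String))) (b : Option (Int × String)),
      chart.foldl (pvStepB uncovered currentImplicants) b =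
        (chart.foldl (pvStepA uncovered currentImplicants) []).foldl (pvUpd pvBefore) b := by
  intro chart
  induction chart with
  | nil => intro b; rfl
  | cons p t ih =>
    intro b
    simp only [List.foldl_cons]
    rw [ih, selA_acc uncovered currentImplicants t (pvStepA uncovered currentImplicants [] p),
      List.foldl_append, stepB_eq]

-- the reverse 2-key sort of the selected list has the pvUpd-fold as its head
theorem sorted2_head (sel : List (Int × String)) :
    (PySem.List.sorted2 sel (fun q => q.1) (fun q => q.2) true).head? =
      sel.foldl (pvUpd pvBefore) none := by
  have h : PySem.List.sorted2 sel (fun q => q.1) (fun q => q.2) true =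
      sel.foldl (fun acc x => PySem.List.insertBy pvBefore x acc) [] := by
    simp only [PySem.List.sorted2]
    rfl
  rw [h, head?_foldl_insertBy]
  rfl

-- ===== VERDICT (by name: the statement is the Claim_ definition above) =====
theorem selectAdditionalImplicant_spec : Claim_equal_selectAdditionalImplicant := by
  intro chart uncovered currentImplicants _ _
  unfold Spec_selectAdditionalImplicant selectAdditionalImplicant selectAdditionalImplicant_alt
  simp only
  rw [bfold_eq_updfold]
  set sel := chart.foldl (pvStepA uncovered currentImplicants) [] with hsel
  by_cases h : sel = []
  · rw [if_pos h, h]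
    rfl
  · rw [if_neg h]
    obtain ⟨q, hq⟩ : ∃ q, sel.foldl (pvUpd pvBefore) none = some q := by
      cases hfold : sel.foldl (pvUpd pvBefore) none with
      | none => exact absurd ((foldl_upd_none_iff pvBefore sel).mp hfold) h
      | some q => exact ⟨q, rfl⟩
    have hhead : (PySem.List.sorted2 sel (fun q => q.1) (fun q => q.2) true).head? = some q := by
      rw [sorted2_head, hq]
    rw [hq]
    cases hs : PySem.List.sorted2 sel (fun q => q.1) (fun q => q.2) true with
    | nil => rw [hs] at hhead; cases hhead
    | cons q' t =>
      rw [hs] at hhead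
      simp only [List.head?_cons, Option.some.injEq] at hhead
      rw [hhead]
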